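-- pv_equiv track=rewrite | github.com/knightsri/Flowscribe | scripts/c4-level3-generator.py | _categorize_components
-- ===== SOURCE A (Python) =====
-- from collections import defaultdict
--
-- def _categorize_components(layer_name, components):
--     """Categorize components by type"""
--     categories = defaultdict(list)
--
--     # Layer-specific categorization
--     if layer_name == "Presentation":
--         for comp_name in components.keys():
--             if 'Handler' in comp_name:
--                 categories['Request Handlers'].append(comp_name)
--             elif 'Controller' in comp_name:
--                 categories['Controllers'].append(comp_name)
--             elif 'Form' in comp_name:
--                 categories['Forms'].append(comp_name)
--             else:
--                 categories['Other UI Components'].append(comp_name)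
--
--     elif layer_name == "Infrastructure":
--         for comp_name in components.keys():
--             if 'DOI' in comp_name or 'Doi' in comp_name:
--                 categories['DOI Services'].append(comp_name)
--             elif 'ORCID' in comp_name or 'Orcid' in comp_name:
--                 categories['ORCID Integration'].append(comp_name)
--             elif 'Mail' in comp_name or 'Email' in comp_name or 'Notif' in comp_name:
--                 categories['Notification Services'].append(comp_name)
--             elif 'Payment' in comp_name:
--                 categories['Payment Services'].append(comp_name)
--             elif 'File' in comp_name:
--                 categories['File Management'].append(comp_name)
--             else:
--                 categories['Other Infrastructure'].append(comp_name)
--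
--     elif layer_name == "Persistence":
--         for comp_name in components.keys():
--             if 'DAO' in comp_name:
--                 categories['Data Access Objects'].append(comp_name)
--             else:
--                 categories['Repository Components'].append(comp_name)
--
--     elif layer_name == "Domain":
--         categories['Domain Entities'] = list(components.keys())
--
--     else:
--         categories['Components'] = list(components.keys())
--
--     return categories
-- ===== SOURCE B (Python) =====
-- from collections import defaultdict
--
-- # layer -> (fallback category, ordered list of (category, substring-group))
-- _TABLE = {
--     "Presentation": ("Other UI Components",
--         [("Request Handlers", ("Handler",)),
--          ("Controllers", ("Controller",)),
--          ("Forms", ("Form",))]),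
--     "Infrastructure": ("Other Infrastructure",
--         [("DOI Services", ("DOI", "Doi")),
--          ("ORCID Integration", ("ORCID", "Orcid")),
--          ("Notification Services", ("Mail", "Email", "Notif")),
--          ("Payment Services", ("Payment",)),
--          ("File Management", ("File",))]),
--     "Persistence": ("Repository Components",
--         [("Data Access Objects", ("DAO",))]),
-- }
--
-- def _label(rules, default, name):
--     for cat, subs in rules:
--         if any(s in name for s in subs):
--             return cat
--     return default
--
-- def _categorize_components(layer_name, components):
--     """Categorize components by type (staged group-by, no per-item dict mutation)"""
--     categories = defaultdict(list)
--     if layer_name in _TABLE: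
--         default, rules = _TABLE[layer_name]
--         names = list(components.keys())
--         labels = [_label(rules, default, n) for n in names]
--         # distinct labels in first-occurrence order, one bucket per label by filtering
--         for cat in dict.fromkeys(labels):
--             categories[cat] = [n for n, l in zip(names, labels) if l == cat]
--     else:
--         key = "Domain Entities" if layer_name == "Domain" else "Components"
--         categories[key] = list(components.keys())
--     return categories
-- ===== Notes on version B (the rewrite author's own statement) =====
-- stated objective: alternative
-- what changed: A makes one pass over the components, classifying each name with an if/elif cascade and appending it into a mutated defaultdict; B is a staged group-by: it maps every name to a category label, dedupes the labels in first-occurrence order (dict.fromkeys) from a data-driven rule table, and then builds each bucket in one shot by filtering the zipped name/label list, assigning whole lists instead of mutating per item.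
import Mathlib
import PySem

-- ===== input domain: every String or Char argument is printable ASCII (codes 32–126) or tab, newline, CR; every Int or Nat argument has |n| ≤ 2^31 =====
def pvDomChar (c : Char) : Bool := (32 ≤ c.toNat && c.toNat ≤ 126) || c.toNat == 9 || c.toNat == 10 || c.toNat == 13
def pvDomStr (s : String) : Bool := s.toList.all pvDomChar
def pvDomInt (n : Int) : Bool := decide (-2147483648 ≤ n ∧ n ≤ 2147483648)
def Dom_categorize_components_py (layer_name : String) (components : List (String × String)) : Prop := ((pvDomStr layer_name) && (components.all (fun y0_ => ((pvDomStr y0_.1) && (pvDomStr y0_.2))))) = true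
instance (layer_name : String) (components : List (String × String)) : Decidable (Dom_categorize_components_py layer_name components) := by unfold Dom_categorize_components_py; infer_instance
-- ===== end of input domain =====

-- ===== PORT A =====
-- One honest line: B replaces A's single pass that mutates a defaultdict per component by a
-- staged group-by (label pass, ordered dedup of labels, one zip-filter per bucket); objective: alternative.
def categorize_components_py (layer_name : String) (components : List (String × String)) : List (String × List String) :=
  let d0 : PySem.Dict String (List String) := PySem.Dict.empty
  if layer_name = "Presentation" then
    (components.foldl (fun d p =>
      if PySem.Str.isIn "Handler" p.1 then d.modify "Request Handlers" [] (· ++ [p.1])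
      else if PySem.Str.isIn "Controller" p.1 then d.modify "Controllers" [] (· ++ [p.1])
      else if PySem.Str.isIn "Form" p.1 then d.modify "Forms" [] (· ++ [p.1])
      else d.modify "Other UI Components" [] (· ++ [p.1])) d0).items
  else if layer_name = "Infrastructure" then
    (components.foldl (fun d p =>
      if PySem.Str.isIn "DOI" p.1 || PySem.Str.isIn "Doi" p.1 then d.modify "DOI Services" [] (· ++ [p.1])
      else if PySem.Str.isIn "ORCID" p.1 || PySem.Str.isIn "Orcid" p.1 then d.modify "ORCID Integration" [] (· ++ [p.1])
      else if PySem.Str.isIn "Mail" p.1 || PySem.Str.isIn "Email" p.1 || PySem.Str.isIn "Notif" p.1 then d.modify "Notification Services" [] (· ++ [p.1])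
      else if PySem.Str.isIn "Payment" p.1 then d.modify "Payment Services" [] (· ++ [p.1])
      else if PySem.Str.isIn "File" p.1 then d.modify "File Management" [] (· ++ [p.1])
      else d.modify "Other Infrastructure" [] (· ++ [p.1])) d0).items
  else if layer_name = "Persistence" then
    (components.foldl (fun d p =>
      if PySem.Str.isIn "DAO" p.1 then d.modify "Data Access Objects" [] (· ++ [p.1])
      else d.modify "Repository Components" [] (· ++ [p.1])) d0).items
  else if layer_name = "Domain" then
    (d0.insert "Domain Entities" (components.map (·.1))).items
  else
    (d0.insert "Components" (components.map (·.1))).items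

-- ===== PORT B =====
-- Source B's _TABLE: layer -> (fallback category, ordered (category, substring-group) rules)
def pvTable (layer : String) : Option (String × List (String × List String)) :=
  if layer = "Presentation" then
    some ("Other UI Components",
          [("Request Handlers", ["Handler"]),
           ("Controllers", ["Controller"]),
           ("Forms", ["Form"])])
  else if layer = "Infrastructure" then
    some ("Other Infrastructure",
          [("DOI Services", ["DOI", "Doi"]),
           ("ORCID Integration", ["ORCID", "Orcid"]),
           ("Notification Services", ["Mail", "Email", "Notif"]),
           ("Payment Services", ["Payment"]),
           ("File Management", ["File"])])
  else if layer = "Persistence" then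
    some ("Repository Components", [("Data Access Objects", ["DAO"])])
  else none

-- Source B's _label: first rule whose substring-group matches, else the fallback
def pvLabel (rules : List (String × List String)) (default : String) (name : String) : String :=
  match rules with
  | [] => default
  | (cat, subs) :: rest =>
      if subs.any (fun s => PySem.Str.isIn s name) then cat else pvLabel rest default name

def categorize_components_py_alt (layer_name : String) (components : List (String × String)) : List (String × List String) :=
  match pvTable layer_name with
  | some (default, rules) =>
      let names := components.map (·.1)
      let labels := names.map (pvLabel rules default)
      -- dict.fromkeys(labels) is PySem.List.dedup; one zip-filter per bucket key
      ((PySem.List.dedup labels).foldl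
        (fun d c => d.insert c (((names.zip labels).filter (fun nl => nl.2 == c)).map (·.1)))
        (PySem.Dict.empty : PySem.Dict String (List String))).items
  | none =>
      ((PySem.Dict.empty : PySem.Dict String (List String)).insert
        (if layer_name = "Domain" then "Domain Entities" else "Components")
        (components.map (·.1))).items

-- ===== PRECONDITION & SPEC =====
def Spec_categorize_components_py (layer_name : String) (components : List (String × String)) (out : List (String × List String)) : Prop := out = categorize_components_py_alt layer_name components
instance (layer_name : String) (components : List (String × String)) (out : List (String × List String)) : Decidable (Spec_categorize_components_py layer_name components out) := by unfold Spec_categorize_components_py; infer_instance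

-- ===== CLAIM (what is proved, stated in full; the proofs are below) =====
def Claim_equal_categorize_components_py : Prop := ∀ (layer_name : String) (components : List (String × String)), Dom_categorize_components_py layer_name components → Spec_categorize_components_py layer_name components (categorize_components_py layer_name components)

-- ===== LEMMAS AND PROOFS =====

theorem pv_zip_map (f : String → String) (ns : List String) :
    ns.zip (ns.map f) = ns.map (fun n => (n, f n)) := by
  induction ns with
  | nil => rfl
  | cons a t ih => simp [ih]

-- A mutate-dict classification fold equals B's staged group-by, for any classifier f.
theorem pv_groupby (f : String → String) (ns : List String) :
    (ns.foldl (fun d n => d.modify (f n) [] (· ++ [n]))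
      (PySem.Dict.empty : PySem.Dict String (List String))).items
    = ((PySem.List.dedup (ns.map f)).foldl
        (fun d c => d.insert c (((ns.zip (ns.map f)).filter (fun nl => nl.2 == c)).map (·.1)))
        (PySem.Dict.empty : PySem.Dict String (List String))).items := by
  have hR := PySem.Dict.items_foldl_insert_fresh (PySem.List.dedup (ns.map f)) (fun c => c)
      (fun c => ((ns.zip (ns.map f)).filter (fun nl => nl.2 == c)).map (·.1))
      (PySem.Dict.empty : PySem.Dict String (List String))
      (by intro a _; exact PySem.Dict.contains_empty a)
      (by simp)
  rw [hR]
  have hnd : ((ns.foldl (fun d n => d.modify (f n) [] (· ++ [n]))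
      (PySem.Dict.empty : PySem.Dict String (List String))).keys).Nodup :=
    PySem.Dict.nodup_keys_foldl_modify_key ns (fun n => f n) [] _ _ (by simp)
  rw [PySem.Dict.items_eq_map_keys _ hnd []]
  rw [PySem.Dict.keys_foldl_modify_key]
  have hempty : (PySem.Dict.empty : PySem.Dict String (List String)).items = [] := rfl
  simp only [PySem.Dict.keys_empty, hempty, List.nil_append] at *
  have hkeys : PySem.Set.update ([] : List String) (ns.map f) = PySem.List.dedup (ns.map f) := by
    simp [PySem.List.dedup_eq_ofList, PySem.Set.ofList, PySem.Set.update]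
  rw [hkeys]
  apply List.map_congr_left
  intro c hc
  have hfold : (ns.foldl (fun d n => d.modify (f n) [] (· ++ [n]))
      (PySem.Dict.empty : PySem.Dict String (List String)))
      = ((ns.map (fun n => (f n, n))).foldl (fun d q => d.modify q.1 [] (· ++ [q.2]))
      (PySem.Dict.empty : PySem.Dict String (List String))) := by
    rw [List.foldl_map]
  rw [hfold, PySem.Dict.getD_foldl_modify_append]
  simp [List.filter_map, pv_zip_map, Function.comp_def]

-- A's pair-fold with a classifier depending only on the name, restated over the name list.
theorem pv_fold_fst (f : String → String) (l : List (String × String)) :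
    (l.foldl (fun d p => d.modify (f p.1) [] (· ++ [p.1]))
      (PySem.Dict.empty : PySem.Dict String (List String)))
    = ((l.map (·.1)).foldl (fun d n => d.modify (f n) [] (· ++ [n]))
      (PySem.Dict.empty : PySem.Dict String (List String))) := by
  rw [List.foldl_map]

-- ===== VERDICT (by name: the statement is the Claim_ definition above) =====
theorem categorize_components_py_spec : Claim_equal_categorize_components_py := by
  intro layer components _
  unfold Spec_categorize_components_py categorize_components_py categorize_components_py_alt pvTable
  by_cases h1 : layer = "Presentation"
  · simp only [h1, String.reduceEq, reduceIte]
    have hc : (fun (d : PySem.Dict String (List String)) (p : String × String) =>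
        if PySem.Str.isIn "Handler" p.1 then d.modify "Request Handlers" [] (· ++ [p.1])
        else if PySem.Str.isIn "Controller" p.1 then d.modify "Controllers" [] (· ++ [p.1])
        else if PySem.Str.isIn "Form" p.1 then d.modify "Forms" [] (· ++ [p.1])
        else d.modify "Other UI Components" [] (· ++ [p.1]))
        = fun d p => d.modify
            (pvLabel [("Request Handlers", ["Handler"]), ("Controllers", ["Controller"]),
                      ("Forms", ["Form"])] "Other UI Components" p.1) [] (· ++ [p.1]) := by
      funext d p
      simp only [pvLabel, List.any_cons, List.any_nil, Bool.or_false]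
      split_ifs <;> rfl
    rw [hc, pv_fold_fst, pv_groupby]
  · by_cases h2 : layer = "Infrastructure"
    · simp only [h2, String.reduceEq, reduceIte]
      have hc : (fun (d : PySem.Dict String (List String)) (p : String × String) =>
          if PySem.Str.isIn "DOI" p.1 || PySem.Str.isIn "Doi" p.1 then d.modify "DOI Services" [] (· ++ [p.1])
          else if PySem.Str.isIn "ORCID" p.1 || PySem.Str.isIn "Orcid" p.1 then d.modify "ORCID Integration" [] (· ++ [p.1])
          else if PySem.Str.isIn "Mail" p.1 || PySem.Str.isIn "Email" p.1 || PySem.Str.isIn "Notif" p.1 then d.modify "Notification Services" [] (· ++ [p.1])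
          else if PySem.Str.isIn "Payment" p.1 then d.modify "Payment Services" [] (· ++ [p.1])
          else if PySem.Str.isIn "File" p.1 then d.modify "File Management" [] (· ++ [p.1])
          else d.modify "Other Infrastructure" [] (· ++ [p.1]))
          = fun d p => d.modify
              (pvLabel [("DOI Services", ["DOI", "Doi"]), ("ORCID Integration", ["ORCID", "Orcid"]),
                        ("Notification Services", ["Mail", "Email", "Notif"]),
                        ("Payment Services", ["Payment"]), ("File Management", ["File"])]
                "Other Infrastructure" p.1) [] (· ++ [p.1]) := by
        funext d p
        simp only [pvLabel, List.any_cons, List.any_nil, Bool.or_false, Bool.or_assoc]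
        split_ifs <;> rfl
      rw [hc, pv_fold_fst, pv_groupby]
    · by_cases h3 : layer = "Persistence"
      · simp only [h3, String.reduceEq, reduceIte]
        have hc : (fun (d : PySem.Dict String (List String)) (p : String × String) =>
            if PySem.Str.isIn "DAO" p.1 then d.modify "Data Access Objects" [] (· ++ [p.1])
            else d.modify "Repository Components" [] (· ++ [p.1]))
            = fun d p => d.modify
                (pvLabel [("Data Access Objects", ["DAO"])] "Repository Components" p.1) [] (· ++ [p.1]) := by
          funext d p
          simp only [pvLabel, List.any_cons, List.any_nil, Bool.or_false]
          split_ifs <;> rfl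
        rw [hc, pv_fold_fst, pv_groupby]
      · by_cases h4 : layer = "Domain" <;> simp [h1, h2, h3, h4]
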